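-- pv_equiv track=rewrite | github.com/ItsrAvI-rAnJaN/Python-Practice | github/logical_question/problems.py | largest_zero_sum_subarray
-- ===== SOURCE A (Python) =====
-- def largest_zero_sum_subarray(arr):
--     lar_len=0
--     n=len(arr)
--     for i in range(n):
--         curr_sum=0
--         for j in range(i,n):
--             curr_sum+=arr[j]
--             if curr_sum==0:
--                 lar_len=max(lar_len,j-i+1)
--     return lar_len
-- ===== SOURCE B (Python) =====
-- def largest_zero_sum_subarray(arr):
--     # prefix sums: subarray arr[k:j] sums to zero iff prefix(k) == prefix(j);
--     # keep the first index each prefix value was seen at.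
--     best = 0
--     s = 0
--     first = {0: 0}
--     for idx, x in enumerate(arr):
--         s += x
--         if s in first:
--             best = max(best, idx + 1 - first[s])
--         else:
--             first[s] = idx + 1
--     return best
-- ===== Notes on version B (the rewrite author's own statement) =====
-- stated objective: faster
-- what changed: A's O(n^2) nested scan over all start/end pairs is replaced by a single pass keeping a running prefix sum and a dict mapping each prefix value to its first index, so the longest zero-sum subarray ending at each position is found in O(1).
import Mathlib
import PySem

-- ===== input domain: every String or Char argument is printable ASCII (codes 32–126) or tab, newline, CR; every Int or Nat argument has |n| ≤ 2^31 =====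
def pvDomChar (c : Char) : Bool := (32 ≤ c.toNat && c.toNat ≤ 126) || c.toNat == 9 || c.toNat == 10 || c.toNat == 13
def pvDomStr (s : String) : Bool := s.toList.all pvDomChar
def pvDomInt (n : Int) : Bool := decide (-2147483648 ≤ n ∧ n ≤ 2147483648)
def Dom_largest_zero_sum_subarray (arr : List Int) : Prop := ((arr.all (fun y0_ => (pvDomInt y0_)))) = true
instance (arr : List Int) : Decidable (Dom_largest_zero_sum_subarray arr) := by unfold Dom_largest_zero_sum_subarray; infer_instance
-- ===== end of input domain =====

-- B replaces A's quadratic double loop by a single pass over prefix sums with a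
-- dict of each prefix value's first index (objective: faster, asymptotic).

-- ===== PORT A =====
def largest_zero_sum_subarray (arr : List Int) : Int :=
  let n : Int := arr.length
  (PySem.List.pyRange 0 n 1).foldl
    (fun lar_len i =>
      ((PySem.List.pyRange i n 1).foldl
          (fun (st : Int × Int) j =>
            let curr_sum := st.1 + PySem.List.pyGetD arr j 0
            (curr_sum, if curr_sum = 0 then max st.2 (j - i + 1) else st.2))
          ((0 : Int), lar_len)).2)
    0

-- ===== PORT B =====
def largest_zero_sum_subarray_alt (arr : List Int) : Int :=
  ((PySem.List.enumerate arr 0).foldl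
      (fun (st : Int × PySem.Dict Int Int × Int) p =>
        let s := st.1 + p.2
        match PySem.Dict.get? st.2.1 s with
        | some k => (s, st.2.1, max st.2.2 (p.1 + 1 - k))
        | none => (s, PySem.Dict.insert st.2.1 s (p.1 + 1), st.2.2))
      (0, PySem.Dict.insert PySem.Dict.empty 0 0, 0)).2.2

-- ===== PRECONDITION & SPEC =====
def Spec_largest_zero_sum_subarray (arr : List Int) (out : Int) : Prop := out = largest_zero_sum_subarray_alt arr
instance (arr : List Int) (out : Int) : Decidable (Spec_largest_zero_sum_subarray arr out) := by unfold Spec_largest_zero_sum_subarray; infer_instance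

-- ===== CLAIM (what is proved, stated in full; the proofs are below) =====
def Claim_equal_largest_zero_sum_subarray : Prop := ∀ (arr : List Int), Dom_largest_zero_sum_subarray arr → Spec_largest_zero_sum_subarray arr (largest_zero_sum_subarray arr)

-- ===== LEMMAS AND PROOFS =====

-- prefix sum of the first k elements
def pvP (arr : List Int) (k : Nat) : Int := (arr.take k).sum

-- "r is the length of the longest zero-sum contiguous subarray (0 if none)":
-- the subarray arr[k:j] sums to zero iff the prefix sums pvP k and pvP j agree.
def pvGood (arr : List Int) (r : Int) : Prop :=
  0 ≤ r ∧
  (∀ k j : Nat, k < j → j ≤ arr.length → pvP arr k = pvP arr j → (j : Int) - (k : Int) ≤ r) ∧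
  (r = 0 ∨ ∃ k j : Nat, k < j ∧ j ≤ arr.length ∧ pvP arr k = pvP arr j ∧ r = (j : Int) - (k : Int))

theorem pvGood_unique {arr : List Int} {r₁ r₂ : Int} (h₁ : pvGood arr r₁) (h₂ : pvGood arr r₂) :
    r₁ = r₂ := by
  obtain ⟨n1, b1, a1⟩ := h₁
  obtain ⟨n2, b2, a2⟩ := h₂
  have le12 : r₁ ≤ r₂ := by
    rcases a1 with rfl | ⟨k, j, hk, hj, hp, rfl⟩
    · exact n2
    · exact b2 k j hk hj hp
  have le21 : r₂ ≤ r₁ := by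
    rcases a2 with rfl | ⟨k, j, hk, hj, hp, rfl⟩
    · exact n1
    · exact b1 k j hk hj hp
  omega

theorem pvP_zero (arr : List Int) : pvP arr 0 = 0 := rfl

theorem pvP_succ (arr : List Int) (k : Nat) (h : k < arr.length) :
    pvP arr (k + 1) = pvP arr k + arr[k] := by
  have h1 : arr.take (k + 1) = arr.take k ++ [arr[k]] := by
    rw [List.take_add_one, List.getElem?_eq_getElem h]
    rfl
  unfold pvP
  rw [h1, List.sum_append, List.sum_cons, List.sum_nil, add_zero]

-- ---------- A side ----------

-- one step of A's inner loop (i is the Int value of the outer index)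
def pvInnerStep (arr : List Int) (i : Int) (st : Int × Int) (k : Nat) : Int × Int :=
  (st.1 + PySem.List.pyGetD arr (i + (k : Int)) 0,
   if st.1 + PySem.List.pyGetD arr (i + (k : Int)) 0 = 0
   then max st.2 ((k : Int) + 1) else st.2)

theorem portA_eq (arr : List Int) :
    largest_zero_sum_subarray arr =
      (List.range arr.length).foldl
        (fun lar i =>
          ((List.range (arr.length - i)).foldl (pvInnerStep arr (i : Int)) (0, lar)).2) 0 := by
  simp [largest_zero_sum_subarray, PySem.List.pyRange_one, List.foldl_map, Int.toNat_sub]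
  rfl

theorem innerA_spec (arr : List Int) (i : Nat) (lar : Int) :
    ∀ t : Nat, i + t ≤ arr.length →
      (((List.range t).foldl (pvInnerStep arr (i : Int)) (0, lar)).1
          = pvP arr (i + t) - pvP arr i) ∧
      lar ≤ ((List.range t).foldl (pvInnerStep arr (i : Int)) (0, lar)).2 ∧
      (∀ j : Nat, i ≤ j → j < i + t → pvP arr (j + 1) = pvP arr i →
        (j : Int) + 1 - (i : Int) ≤ ((List.range t).foldl (pvInnerStep arr (i : Int)) (0, lar)).2) ∧
      (((List.range t).foldl (pvInnerStep arr (i : Int)) (0, lar)).2 = lar ∨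
        ∃ j : Nat, i ≤ j ∧ j < i + t ∧ pvP arr (j + 1) = pvP arr i ∧
          ((List.range t).foldl (pvInnerStep arr (i : Int)) (0, lar)).2 = (j : Int) + 1 - (i : Int)) := by
  intro t
  induction t with
  | zero =>
    simp only [List.range_zero, List.foldl_nil]
    intro _
    refine ⟨?_, ?_, ?_, ?_⟩
    · simp
    · exact le_refl lar
    · intro j hj1 hj2 _
      omega
    · exact Or.inl (by trivial)
  | succ t ih =>
    intro ht
    have hlt : i + t < arr.length := by omega
    obtain ⟨h1, h2, h3, h4⟩ := ih (by omega)
    rw [List.range_succ, List.foldl_append, List.foldl_cons, List.foldl_nil]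
    set st := (List.range t).foldl (pvInnerStep arr (i : Int)) (0, lar) with hst
    have hget : PySem.List.pyGetD arr ((i : Int) + (t : Int)) 0 = arr[i + t] := by
      have hc : ((i : Int) + (t : Int)) = ((i + t : Nat) : Int) := by push_cast; ring
      rw [hc, PySem.List.pyGetD_natCast, List.getD_eq_getElem _ _ hlt]
    have harr : pvP arr (i + t) - pvP arr i + arr[i + t] = pvP arr (i + t + 1) - pvP arr i := by
      rw [pvP_succ arr (i + t) hlt]; ring
    have hstep : pvInnerStep arr (i : Int) st t =
        (pvP arr (i + t + 1) - pvP arr i,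
         if pvP arr (i + t + 1) - pvP arr i = 0 then max st.2 ((t : Int) + 1) else st.2) := by
      unfold pvInnerStep
      rw [hget, h1, harr]
    rw [hstep]
    by_cases hz : pvP arr (i + t + 1) - pvP arr i = 0
    · rw [if_pos hz]
      dsimp only
      have hzz : pvP arr (i + t + 1) = pvP arr i := by omega
      refine ⟨rfl, le_trans h2 (le_max_left _ _), ?_, ?_⟩
      · intro j hj1 hj2 hj3
        by_cases hj : j < i + t
        · exact le_trans (h3 j hj1 hj hj3) (le_max_left _ _)
        · have hj' : j = i + t := by omega
          subst hj'
          have hle := le_max_right st.2 ((t : Int) + 1)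
          push_cast
          omega
      · rcases max_choice st.2 ((t : Int) + 1) with hmx | hmx
        · rw [hmx]
          rcases h4 with h | ⟨j, hj1, hj2, hj3, hj4⟩
          · exact Or.inl h
          · exact Or.inr ⟨j, hj1, by omega, hj3, hj4⟩
        · rw [hmx]
          refine Or.inr ⟨i + t, by omega, by omega, hzz, by push_cast; ring⟩
    · rw [if_neg hz]
      dsimp only
      refine ⟨rfl, h2, ?_, ?_⟩
      · intro j hj1 hj2 hj3
        by_cases hj : j < i + t
        · exact h3 j hj1 hj hj3
        · have hj' : j = i + t := by omega
          subst hj'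
          exact absurd (by omega : pvP arr (i + t + 1) - pvP arr i = 0) hz
      · rcases h4 with h | ⟨j, hj1, hj2, hj3, hj4⟩
        · exact Or.inl h
        · exact Or.inr ⟨j, hj1, by omega, hj3, hj4⟩

theorem outerA_spec (arr : List Int) :
    ∀ m : Nat, m ≤ arr.length →
      0 ≤ (List.range m).foldl
          (fun lar i => ((List.range (arr.length - i)).foldl (pvInnerStep arr (i : Int)) (0, lar)).2) 0 ∧
      (∀ k j : Nat, k < m → k < j → j ≤ arr.length → pvP arr k = pvP arr j →
        (j : Int) - (k : Int) ≤ (List.range m).foldl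
          (fun lar i => ((List.range (arr.length - i)).foldl (pvInnerStep arr (i : Int)) (0, lar)).2) 0) ∧
      ((List.range m).foldl
          (fun lar i => ((List.range (arr.length - i)).foldl (pvInnerStep arr (i : Int)) (0, lar)).2) 0 = 0 ∨
        ∃ k j : Nat, k < m ∧ k < j ∧ j ≤ arr.length ∧ pvP arr k = pvP arr j ∧
          (List.range m).foldl
            (fun lar i => ((List.range (arr.length - i)).foldl (pvInnerStep arr (i : Int)) (0, lar)).2) 0
            = (j : Int) - (k : Int)) := by
  intro m
  induction m with
  | zero =>
    simp only [List.range_zero, List.foldl_nil]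
    intro _
    refine ⟨?_, ?_, ?_⟩
    · exact le_refl 0
    · intro k j hk _ _ _
      omega
    · exact Or.inl (by trivial)
  | succ m ih =>
    intro hm
    obtain ⟨h0, hb, ha⟩ := ih (by omega)
    rw [List.range_succ, List.foldl_append, List.foldl_cons, List.foldl_nil]
    set lar := (List.range m).foldl
      (fun lar i => ((List.range (arr.length - i)).foldl (pvInnerStep arr (i : Int)) (0, lar)).2) 0 with hlar
    obtain ⟨g1, g2, g3, g4⟩ := innerA_spec arr m lar (arr.length - m) (by omega)
    refine ⟨le_trans h0 g2, ?_, ?_⟩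
    · intro k j hk hkj hj hp
      by_cases hkm : k < m
      · exact le_trans (hb k j hkm hkj hj hp) g2
      · have hkm' : k = m := by omega
        subst hkm'
        have hpp : pvP arr ((j - 1) + 1) = pvP arr k := by
          rw [show (j - 1) + 1 = j from by omega]; exact hp.symm
        have hg := g3 (j - 1) (by omega) (by omega) hpp
        have hc : ((j - 1 : Nat) : Int) = (j : Int) - 1 := by omega
        omega
    · rcases g4 with h | ⟨j, hj1, hj2, hj3, hj4⟩
      · rw [h]
        rcases ha with ha | ⟨k, j, hk, hkj, hj, hp, hv⟩
        · exact Or.inl ha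
        · exact Or.inr ⟨k, j, by omega, hkj, hj, hp, hv⟩
      · refine Or.inr ⟨m, j + 1, by omega, by omega, by omega, hj3.symm, ?_⟩
        rw [hj4]; push_cast; ring

theorem A_good (arr : List Int) : pvGood arr (largest_zero_sum_subarray arr) := by
  rw [portA_eq]
  obtain ⟨h0, hb, ha⟩ := outerA_spec arr arr.length (le_refl _)
  refine ⟨h0, ?_, ?_⟩
  · intro k j hk hj hp
    exact hb k j (by omega) hk hj hp
  · rcases ha with h | ⟨k, j, _, hkj, hj, hp, hv⟩
    · exact Or.inl h
    · exact Or.inr ⟨k, j, hkj, hj, hp, hv⟩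

-- ---------- B side ----------

def pvBstep (st : Int × PySem.Dict Int Int × Int) (p : Int × Int) :
    Int × PySem.Dict Int Int × Int :=
  match PySem.Dict.get? st.2.1 (st.1 + p.2) with
  | some k => (st.1 + p.2, st.2.1, max st.2.2 (p.1 + 1 - k))
  | none => (st.1 + p.2, PySem.Dict.insert st.2.1 (st.1 + p.2) (p.1 + 1), st.2.2)

theorem portB_eq (arr : List Int) :
    largest_zero_sum_subarray_alt arr =
      ((PySem.List.enumerate arr 0).foldl pvBstep
        (0, PySem.Dict.insert PySem.Dict.empty 0 0, 0)).2.2 := rfl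

-- find? on a range returns the least index satisfying the predicate
theorem pv_find?_range_some {p : Nat → Bool} {n k : Nat}
    (h : (List.range n).find? p = some k) :
    k < n ∧ p k = true ∧ ∀ j, j < k → p j = false := by
  induction n with
  | zero => simp at h
  | succ n ih =>
    rw [List.range_succ, List.find?_append] at h
    rcases Option.eq_none_or_eq_some ((List.range n).find? p) with hf | ⟨k0, hf⟩
    case inr =>
      rw [hf, Option.some_or] at h
      injection h with hk
      subst hk
      obtain ⟨a, b, c⟩ := ih hf
      exact ⟨by omega, b, c⟩
    case inl =>
      rw [hf, Option.none_or] at h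
      simp at h
      obtain ⟨hp, hk⟩ := h
      subst hk
      refine ⟨Nat.lt_succ_self n, hp, ?_⟩
      intro j hj
      have h5 := List.find?_eq_none.mp hf j (by simp [List.mem_range]; omega)
      simpa using h5

-- invariant of B's single pass after the first m elements
def pvInv (arr : List Int) (m : Nat) (st : Int × PySem.Dict Int Int × Int) : Prop :=
  st.1 = pvP arr m ∧
  (∀ v : Int, PySem.Dict.get? st.2.1 v =
      ((List.range (m + 1)).find? (fun k => pvP arr k == v)).map (fun k => (k : Int))) ∧
  0 ≤ st.2.2 ∧
  (∀ k j : Nat, k < j → j ≤ m → pvP arr k = pvP arr j → (j : Int) - (k : Int) ≤ st.2.2) ∧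
  (st.2.2 = 0 ∨ ∃ k j : Nat, k < j ∧ j ≤ m ∧ pvP arr k = pvP arr j ∧ st.2.2 = (j : Int) - (k : Int))

theorem B_take (arr : List Int) :
    ∀ m : Nat, m ≤ arr.length →
      pvInv arr m ((PySem.List.enumerate (arr.take m) 0).foldl pvBstep
        (0, PySem.Dict.insert PySem.Dict.empty 0 0, 0)) := by
  intro m
  induction m with
  | zero =>
    intro _
    simp only [List.take_zero, PySem.List.enumerate_nil, List.foldl_nil]
    refine ⟨rfl, ?_, le_refl _, ?_, Or.inl rfl⟩
    · intro v
      rw [PySem.Dict.get?_insert, List.range_one]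
      by_cases hv : v = 0
      · subst hv
        rw [if_pos rfl]
        simp [List.find?_cons, pvP_zero]
      · rw [if_neg hv, PySem.Dict.get?_empty]
        simp [List.find?_cons, pvP_zero, Ne.symm hv]
    · intro k j hk hj _
      omega
  | succ m ih =>
    intro hm
    have hm' : m < arr.length := by omega
    obtain ⟨hs, hd, hb0, hbB, hbA⟩ := ih (by omega)
    have htake : arr.take (m + 1) = arr.take m ++ [arr[m]] := by
      rw [List.take_add_one, List.getElem?_eq_getElem hm']
      rfl
    have hlen : (arr.take m).length = m := by
      rw [List.length_take]
      omega
    have henum : PySem.List.enumerate (arr.take (m + 1)) 0 =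
        PySem.List.enumerate (arr.take m) 0 ++ [((m : Int), arr[m])] := by
      rw [htake, PySem.List.enumerate_append, hlen]
      simp [PySem.List.enumerate_cons, PySem.List.enumerate_nil]
    rw [henum, List.foldl_append, List.foldl_cons, List.foldl_nil]
    set st := (PySem.List.enumerate (arr.take m) 0).foldl pvBstep
      (0, PySem.Dict.insert PySem.Dict.empty 0 0, 0) with hstdef
    have hsum : st.1 + arr[m] = pvP arr (m + 1) := by
      rw [hs, pvP_succ arr m hm']
    cases hfind : (List.range (m + 1)).find? (fun k => pvP arr k == pvP arr (m + 1)) with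
    | none =>
      have hget2 : PySem.Dict.get? st.2.1 (st.1 + arr[m]) = none := by
        rw [hsum, hd, hfind]
        rfl
      have hstep : pvBstep st ((m : Int), arr[m]) =
          (st.1 + arr[m], PySem.Dict.insert st.2.1 (st.1 + arr[m]) ((m : Int) + 1), st.2.2) := by
        unfold pvBstep
        dsimp only
        rw [hget2]
      rw [hstep]
      have hnone : ∀ k : Nat, k < m + 1 → pvP arr k ≠ pvP arr (m + 1) := by
        intro k hk hc
        have h5 := List.find?_eq_none.mp hfind k (by simp [List.mem_range]; omega)
        simp [hc] at h5
      refine ⟨hsum, ?_, hb0, ?_, ?_⟩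
      · intro v
        rw [hsum, PySem.Dict.get?_insert, List.range_succ, List.find?_append]
        by_cases hv : v = pvP arr (m + 1)
        · subst hv
          rw [if_pos rfl, hfind, Option.none_or]
          simp [List.find?_cons]
        · have hpf : List.find? (fun k => pvP arr k == v) [m + 1] = none := by
            have hbf : (pvP arr (m + 1) == v) = false :=
              beq_eq_false_iff_ne.mpr (fun hc => hv (Eq.symm hc))
            simp [List.find?_cons, hbf]
          rw [if_neg hv, hpf, Option.or_none, hd v]
      · intro k j hk hj hp
        by_cases hjm : j ≤ m
        · exact hbB k j hk hjm hp
        · have hj' : j = m + 1 := by omega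
          subst hj'
          exact absurd hp (hnone k (by omega))
      · rcases hbA with h | ⟨k, j, hk, hj, hp, hv2⟩
        · exact Or.inl h
        · exact Or.inr ⟨k, j, hk, by omega, hp, hv2⟩
    | some kf =>
      obtain ⟨hkf1, hkf2, hkf3⟩ := pv_find?_range_some hfind
      have hkfp : pvP arr kf = pvP arr (m + 1) := by simpa using hkf2
      have hget2 : PySem.Dict.get? st.2.1 (st.1 + arr[m]) = some ((kf : Int)) := by
        rw [hsum, hd, hfind]
        rfl
      have hstep : pvBstep st ((m : Int), arr[m]) =
          (st.1 + arr[m], st.2.1, max st.2.2 ((m : Int) + 1 - (kf : Int))) := by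
        unfold pvBstep
        dsimp only
        rw [hget2]
      rw [hstep]
      refine ⟨hsum, ?_, le_trans hb0 (le_max_left _ _), ?_, ?_⟩
      · intro v
        rw [List.range_succ, List.find?_append]
        by_cases hv : v = pvP arr (m + 1)
        · subst hv
          rw [hd, hfind, Option.some_or]
        · have hpf : List.find? (fun k => pvP arr k == v) [m + 1] = none := by
            have hbf : (pvP arr (m + 1) == v) = false :=
              beq_eq_false_iff_ne.mpr (fun hc => hv (Eq.symm hc))
            simp [List.find?_cons, hbf]
          rw [hd v, hpf, Option.or_none]
      · intro k j hk hj hp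
        by_cases hjm : j ≤ m
        · exact le_trans (hbB k j hk hjm hp) (le_max_left _ _)
        · have hj' : j = m + 1 := by omega
          subst hj'
          have hkkf : kf ≤ k := by
            by_contra hc
            have h5 := hkf3 k (by omega)
            simp [hp] at h5
          have hle := le_max_right st.2.2 ((m : Int) + 1 - (kf : Int))
          push_cast
          omega
      · rcases max_choice st.2.2 ((m : Int) + 1 - (kf : Int)) with hmx | hmx
        · rw [hmx]
          rcases hbA with h | ⟨k, j, hk, hj, hp, hv2⟩
          · exact Or.inl h
          · exact Or.inr ⟨k, j, hk, by omega, hp, hv2⟩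
        · rw [hmx]
          exact Or.inr ⟨kf, m + 1, by omega, le_refl _, hkfp, by push_cast; ring⟩

theorem B_good (arr : List Int) : pvGood arr (largest_zero_sum_subarray_alt arr) := by
  rw [portB_eq]
  have h := B_take arr arr.length (le_refl _)
  rw [List.take_length] at h
  obtain ⟨_, _, hb0, hbB, hbA⟩ := h
  exact ⟨hb0, hbB, hbA⟩

-- ===== VERDICT (by name: the statement is the Claim_ definition above) =====
theorem largest_zero_sum_subarray_spec : Claim_equal_largest_zero_sum_subarray := by
  intro arr _
  exact pvGood_unique (A_good arr) (B_good arr)
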